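-- pv_equiv track=rewrite | github.com/CommitHu502Craft/SoftDoc-Pipeline | modules/skill_compliance_validator.py | _domain_allowed
-- ===== SOURCE A (Python) =====
-- from typing import Any, Dict, List, Optional, Tuple
--
-- def _domain_allowed(domain: str, allowed_domains: List[str]) -> bool:
--     host = str(domain or "").strip().lower()
--     if not host:
--         return False
--     normalized = [str(x or "").strip().lower() for x in (allowed_domains or []) if str(x or "").strip()]
--     for item in normalized:
--         if host == item or host.endswith(f".{item}"):
--             return True
--     return False
-- ===== SOURCE B (Python) =====
-- def _domain_allowed(domain, allowed_domains):
--     host = str(domain or "").strip().lower()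
--     if not host:
--         return False
--     allowed = {s for s in (str(x or "").strip().lower() for x in (allowed_domains or [])) if s}
--     candidates = [host] + [host[i + 1:] for i, ch in enumerate(host) if ch == '.']
--     return any(c in allowed for c in candidates)
-- ===== Notes on version B (the rewrite author's own statement) =====
-- stated objective: alternative
-- what changed: Instead of scanning the allowed list and testing host == item / host.endswith('.'+item) per item, B builds a set of normalized allowed domains once and generates the host's dot-suffix candidates (the host plus each suffix after a dot), returning whether any candidate is in the set.
import Mathlib
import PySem

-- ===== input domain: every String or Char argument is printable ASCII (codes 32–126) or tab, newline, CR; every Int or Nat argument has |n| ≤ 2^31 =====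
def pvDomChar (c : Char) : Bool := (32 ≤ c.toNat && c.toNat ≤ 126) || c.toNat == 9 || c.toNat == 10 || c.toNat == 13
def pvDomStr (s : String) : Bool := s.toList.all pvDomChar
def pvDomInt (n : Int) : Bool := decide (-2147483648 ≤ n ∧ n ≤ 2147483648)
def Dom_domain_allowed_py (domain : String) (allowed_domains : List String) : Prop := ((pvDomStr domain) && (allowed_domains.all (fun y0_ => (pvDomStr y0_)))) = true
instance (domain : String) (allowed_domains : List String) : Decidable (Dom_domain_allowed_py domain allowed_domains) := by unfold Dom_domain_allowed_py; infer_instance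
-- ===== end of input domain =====

-- B replaces A's per-item scan of the allowed list (host == item or endswith '.'+item) by one
-- normalized set plus membership tests of the host's dot-suffix candidates (objective: alternative).

-- ===== PORT A =====
-- literal port of A on List Char (PySem.Chars = Python str semantics on the ASCII domain)
def domain_allowed_py (domain : String) (allowed_domains : List String) : Bool :=
  let host := PySem.Chars.lower (PySem.Chars.strip domain.toList)
  if host = [] then false
  else
    let normalized :=
      (allowed_domains.filter (fun x => decide (PySem.Chars.strip x.toList ≠ []))).map
        (fun x => PySem.Chars.lower (PySem.Chars.strip x.toList))
    normalized.any (fun item =>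
      decide (host = item) || PySem.Chars.endswith host ('.' :: item))

-- ===== PORT B =====
-- literal port of B: set of normalized allowed domains + dot-suffix candidates of host
def domain_allowed_py_alt (domain : String) (allowed_domains : List String) : Bool :=
  let host := PySem.Chars.lower (PySem.Chars.strip domain.toList)
  if host = [] then false
  else
    let allowed : PySem.Set (List Char) :=
      PySem.Set.ofList
        ((allowed_domains.map (fun x => PySem.Chars.lower (PySem.Chars.strip x.toList))).filter
          (fun s => decide (s ≠ [])))
    let candidates :=
      host :: (PySem.List.enumerate host).filterMap
        (fun p => if p.2 = '.' then some (PySem.List.slice host (some (p.1 + 1)) none) else none)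
    candidates.any (fun c => PySem.Set.contains allowed c)

-- ===== PRECONDITION & SPEC =====
def Spec_domain_allowed_py (domain : String) (allowed_domains : List String) (out : Bool) : Prop := out = domain_allowed_py_alt domain allowed_domains
instance (domain : String) (allowed_domains : List String) (out : Bool) : Decidable (Spec_domain_allowed_py domain allowed_domains out) := by unfold Spec_domain_allowed_py; infer_instance

-- ===== CLAIM (what is proved, stated in full; the proofs are below) =====
def Claim_equal_domain_allowed_py : Prop := ∀ (domain : String) (allowed_domains : List String), Dom_domain_allowed_py domain allowed_domains → Spec_domain_allowed_py domain allowed_domains (domain_allowed_py domain allowed_domains)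

-- ===== LEMMAS AND PROOFS =====

-- lower preserves emptiness
lemma pv_lower_eq_nil_iff (s : List Char) : PySem.Chars.lower s = [] ↔ s = [] := by
  simp [PySem.Chars.lower]

-- both programs normalize the allowed list to the same list
lemma pv_norm_eq (l : List String) :
    (l.map (fun x => PySem.Chars.lower (PySem.Chars.strip x.toList))).filter
        (fun s => decide (s ≠ [])) =
      (l.filter (fun x => decide (PySem.Chars.strip x.toList ≠ []))).map
        (fun x => PySem.Chars.lower (PySem.Chars.strip x.toList)) := by
  rw [List.filter_map]
  congr 1
  apply List.filter_congr
  intro x _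
  simp [pv_lower_eq_nil_iff]


lemma pv_suffix_iff (host item : List Char) :
    ('.' :: item) <:+ host ↔
      ∃ k, ∃ h : k < host.length, host[k] = '.' ∧ host.drop (k + 1) = item := by
  constructor
  · rintro ⟨t, ht⟩
    refine ⟨t.length, ?_, ?_, ?_⟩ <;> subst ht <;>
      simp [List.getElem_append_right]
  · rintro ⟨k, h, hdot, hdrop⟩
    have : host.drop k = '.' :: item := by
      rw [List.drop_eq_getElem_cons h, hdot, hdrop]
    rw [← this]
    exact List.drop_suffix k host

lemma pv_main (N : List (List Char)) (host : List Char) :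
    (N.any fun item => decide (host = item) || PySem.Chars.endswith host ('.' :: item)) =
      ((host :: (PySem.List.enumerate host).filterMap
          (fun p => if p.2 = '.' then some (PySem.List.slice host (some (p.1 + 1)) none) else none)).any
        fun c => PySem.Set.contains (PySem.Set.ofList N) c) := by
  rw [Bool.eq_iff_iff]
  simp only [List.any_eq_true, List.mem_cons, List.mem_filterMap, PySem.Set.contains,
    PySem.Set.mem_ofList, Bool.or_eq_true, decide_eq_true_eq,
    PySem.List.mem_enumerate_iff, PySem.Chars.endswith_iff, List.contains_iff_mem]
  constructor
  · rintro ⟨item, hmem, heq | hsuf⟩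
    · exact ⟨host, Or.inl rfl, heq ▸ hmem⟩
    · rcases (pv_suffix_iff host item).1 hsuf with ⟨k, hk, hdot, hdrop⟩
      refine ⟨item, Or.inr ⟨(0 + k, host[k]), ⟨k, hk, rfl⟩, ?_⟩, hmem⟩
      have hcast : ((0 + k : Int) + 1) = ((k + 1 : Nat) : Int) := by push_cast; ring
      simp only [hdot, ite_true, hcast, PySem.List.slice_from_natCast, hdrop]
  · rintro ⟨c, rfl | ⟨p, ⟨k, hk, rfl⟩, hc⟩, hmem⟩
    · exact ⟨c, hmem, Or.inl rfl⟩
    · refine ⟨c, hmem, Or.inr ?_⟩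
      apply (pv_suffix_iff host c).2
      by_cases hdot : host[k] = '.'
      · refine ⟨k, hk, hdot, ?_⟩
        have hcast : ((0 + k : Int) + 1) = ((k + 1 : Nat) : Int) := by push_cast; ring
        simp only [hdot, ite_true, hcast, PySem.List.slice_from_natCast] at hc
        exact Option.some_inj.mp hc
      · simp [hdot] at hc


theorem pv_aux (domain : String) (allowed_domains : List String) :
    domain_allowed_py domain allowed_domains = domain_allowed_py_alt domain allowed_domains := by
  simp only [domain_allowed_py, domain_allowed_py_alt]
  by_cases h0 : PySem.Chars.lower (PySem.Chars.strip domain.toList) = []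
  · simp [h0]
  · simp only [if_neg h0]
    rw [pv_norm_eq, pv_main]

-- ===== VERDICT (by name: the statement is the Claim_ definition above) =====
theorem domain_allowed_py_spec : Claim_equal_domain_allowed_py := by
  intro domain allowed_domains _
  exact pv_aux domain allowed_domains
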